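-- pv_equiv track=rewrite | github.com/manatlan/jbrout3 | libs/common.py | xpathquoter
-- ===== SOURCE A (Python) =====
-- def xpathquoter(s):
--     """
--         make string correct for xpath in attributes
--         return correct quote/simplequote around according content of s
--         with concat() function if needed
--         more info : http://article.gmane.org\
--                     /gmane.comp.python.lxml.devel/4040/match=escape+xpath
--     """
--     quote = '"' in s
--     squote = "'" in s
--     if quote and squote:
--         return "concat(%s)" % """,'"',""".join(
--             [xpathquoter(i) for i in s.split('"')])
--     elif squote:
--         return '"%s"' % s
--     else:
--         return "'%s'" % s
-- ===== SOURCE B (Python) =====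
-- def _wrap(frag):
--     # frag contains no double quote here
--     return '"%s"' % frag if "'" in frag else "'%s'" % frag
--
-- def xpathquoter(s):
--     if '"' not in s:
--         return _wrap(s)
--     if "'" not in s:
--         return "'%s'" % s
--     # both quote kinds present: one pass, flushing a fragment at every '"'
--     pieces = []
--     cur = []
--     for ch in s + '"':
--         if ch == '"':
--             pieces.append(_wrap(''.join(cur)))
--             cur = []
--         else:
--             cur.append(ch)
--     return 'concat(%s)' % """,'"',""".join(pieces)
-- ===== Notes on version B (the rewrite author's own statement) =====
-- stated objective: alternative
-- what changed: Replaces A's recursion over the fragments obtained by splitting at double quotes (a full recursive call per fragment) by a single non-recursive left-to-right pass that accumulates the current fragment and flushes a quoted piece at every double-quote character.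
import Mathlib
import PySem

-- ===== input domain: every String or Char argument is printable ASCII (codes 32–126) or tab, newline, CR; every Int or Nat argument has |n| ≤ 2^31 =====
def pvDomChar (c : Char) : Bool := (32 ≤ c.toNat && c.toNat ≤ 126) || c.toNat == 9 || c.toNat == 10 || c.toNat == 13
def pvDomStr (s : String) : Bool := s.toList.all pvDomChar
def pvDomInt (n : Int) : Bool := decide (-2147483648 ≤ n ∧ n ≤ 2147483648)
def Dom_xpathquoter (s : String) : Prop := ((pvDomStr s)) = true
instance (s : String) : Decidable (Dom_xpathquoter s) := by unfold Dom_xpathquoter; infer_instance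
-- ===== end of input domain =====

-- B replaces A's one-level recursion over s.split('"') by a single non-recursive pass over the
-- characters that flushes a quoted fragment at every '"' (objective: alternative decomposition).

-- ===== PORT A =====
-- A's recursion, on List Char; the fuel only makes the same recursion total (it is never exhausted:
-- fragments of split('"') contain no '"', so the recursion is one level deep).
def xpAgo (fuel : Nat) (cs : List Char) : List Char :=
  match fuel with
  | 0 => []
  | fuel + 1 =>
    let quote := PySem.Chars.isIn ['"'] cs
    let squote := PySem.Chars.isIn ['\''] cs
    if quote && squote then
      "concat(".toList ++
        PySem.Chars.join ",'\"',".toList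
          ((PySem.Chars.splitOn cs ['"']).map (fun i => xpAgo fuel i)) ++ ")".toList
    else if squote then '"' :: cs ++ ['"']
    else '\'' :: cs ++ ['\'']

def xpathquoter (s : String) : String := String.ofList (xpAgo (s.toList.length + 1) s.toList)

-- ===== PORT B =====
-- _wrap of Source B
def xpqFrag (frag : List Char) : List Char :=
  if PySem.Chars.isIn ['\''] frag then '"' :: frag ++ ['"'] else '\'' :: frag ++ ['\'']

-- Source B's for-loop: state (pieces, cur), flush at each '"'
def xpqLoop (pieces : List (List Char)) (cur : List Char) : List Char → List (List Char)
  | [] => pieces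
  | c :: rest =>
    if c = '"' then xpqLoop (pieces ++ [xpqFrag cur]) [] rest
    else xpqLoop pieces (cur ++ [c]) rest

def xpathquoter_alt (s : String) : String :=
  let cs := s.toList
  if PySem.Chars.isIn ['"'] cs = false then String.ofList (xpqFrag cs)
  else if PySem.Chars.isIn ['\''] cs = false then String.ofList ('\'' :: cs ++ ['\''])
  else
    String.ofList ("concat(".toList ++
      PySem.Chars.join ",'\"',".toList (xpqLoop [] [] (cs ++ ['"'])) ++ ")".toList)

-- ===== PRECONDITION & SPEC =====
def Spec_xpathquoter (s : String) (out : String) : Prop := out = xpathquoter_alt s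
instance (s : String) (out : String) : Decidable (Spec_xpathquoter s out) := by unfold Spec_xpathquoter; infer_instance

-- ===== CLAIM (what is proved, stated in full; the proofs are below) =====
def Claim_equal_xpathquoter : Prop := ∀ (s : String), Dom_xpathquoter s → Spec_xpathquoter s (xpathquoter s)

-- ===== LEMMAS AND PROOFS =====

-- Reference split on a single character (proof-side only).
def split1 (q : Char) : List Char → List (List Char)
  | [] => [[]]
  | c :: rest => if c = q then [] :: split1 q rest else (split1 q rest).modifyHead (c :: ·)

theorem split1_ne_nil (q : Char) (l : List Char) : split1 q l ≠ [] := by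
  induction l with
  | nil => simp [split1]
  | cons c rest ih =>
    simp only [split1]
    split
    · simp
    · cases h : split1 q rest
      · exact absurd h ih
      · simp

theorem splitOn_go_eq (q : Char) :
    ∀ fuel (l cur : List Char) (acc : List (List Char)) (_ : l.length ≤ fuel),
      PySem.Chars.splitOn.go [q] fuel l cur acc
        = acc.reverse ++ (split1 q l).modifyHead (cur.reverse ++ ·) := by
  intro fuel
  induction fuel with
  | zero =>
    intro l cur acc h
    have hl : l = [] := List.length_eq_zero_iff.mp (Nat.le_zero.mp h)
    subst hl
    simp [PySem.Chars.splitOn.go, split1]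
  | succ fuel ih =>
    intro l cur acc h
    cases l with
    | nil => simp [PySem.Chars.splitOn.go, split1]
    | cons c rest =>
      rw [PySem.Chars.splitOn.go]
      by_cases hc : c = q
      · subst hc
        simp only [List.isPrefixOf, BEq.rfl, Bool.true_and, if_pos]
        rw [ih _ _ _ (by simpa using Nat.le_of_succ_le_succ h)]
        simp only [split1, List.modifyHead, List.reverse_cons, List.append_assoc,
          List.singleton_append, List.nil_append, List.reverse_nil]
        cases hs : split1 c rest <;> simp [hs]
      · have : ([q].isPrefixOf (c :: rest)) = false := by
          simp [List.isPrefixOf, Ne.symm hc]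
        rw [if_neg (by simp [this])]
        rw [ih _ _ _ (by simpa using Nat.le_of_succ_le_succ h)]
        have hne := split1_ne_nil q rest
        cases hs : split1 q rest with
        | nil => exact absurd hs hne
        | cons p ps => simp [split1, hc, hs, List.modifyHead]

theorem splitOn_eq (q : Char) (l : List Char) :
    PySem.Chars.splitOn l [q] = split1 q l := by
  rw [PySem.Chars.splitOn, splitOn_go_eq q (l.length + 1) l [] [] (Nat.le_succ _)]
  cases hs : split1 q l <;> simp [List.modifyHead]

theorem mem_split1_not_mem (q : Char) :
    ∀ (l p : List Char), p ∈ split1 q l → q ∉ p := by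
  intro l
  induction l with
  | nil => intro p hp; simp [split1] at hp; simp [hp]
  | cons c rest ih =>
    intro p hp
    simp only [split1] at hp
    by_cases hc : c = q
    · rw [if_pos hc] at hp
      rcases List.mem_cons.mp hp with h | h
      · simp [h]
      · exact ih p h
    · rw [if_neg hc] at hp
      cases hs : split1 q rest with
      | nil => exact absurd hs (split1_ne_nil q rest)
      | cons f fs =>
        rw [hs] at hp
        simp only [List.modifyHead] at hp
        rcases List.mem_cons.mp hp with h | h
        · subst h
          intro hmem
          rcases List.mem_cons.mp hmem with h | h
          · exact hc h.symm
          · exact ih f (hs ▸ List.mem_cons_self) h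
        · exact ih p (hs ▸ List.mem_cons_of_mem f h)

theorem xpqLoop_eq :
    ∀ (l : List Char) (pieces : List (List Char)) (cur : List Char),
      xpqLoop pieces cur (l ++ ['"'])
        = pieces ++ ((split1 '"' l).modifyHead (cur ++ ·)).map xpqFrag := by
  intro l
  induction l with
  | nil => intro pieces cur; simp [xpqLoop, split1, List.modifyHead]
  | cons c rest ih =>
    intro pieces cur
    by_cases hc : c = '"'
    · subst hc
      show xpqLoop pieces cur ('"' :: (rest ++ ['"'])) = _
      rw [xpqLoop, if_pos rfl, ih]
      cases hs : split1 '"' rest <;>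
        simp [split1, hs, List.modifyHead, List.append_assoc]
    · show xpqLoop pieces cur (c :: (rest ++ ['"'])) = _
      rw [xpqLoop, if_neg hc, ih]
      cases hs : split1 '"' rest with
      | nil => exact absurd hs (split1_ne_nil '"' rest)
      | cons f fs => simp [split1, hc, hs, List.modifyHead, List.append_assoc]

theorem isIn_singleton_false (q : Char) (p : List Char) (h : q ∉ p) :
    PySem.Chars.isIn [q] p = false := by
  rw [PySem.Chars.isIn_eq_false_iff]
  intro hinf
  exact h (hinf.sublist.mem List.mem_cons_self)

theorem isIn_singleton_mem (q : Char) (p : List Char) (h : PySem.Chars.isIn [q] p = true) :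
    q ∈ p := by
  exact ((PySem.Chars.isIn_iff_infix [q] p).mp h).sublist.mem List.mem_cons_self

theorem xpAgo_frag (fuel : Nat) (p : List Char) (h : '"' ∉ p) :
    xpAgo (fuel + 1) p = xpqFrag p := by
  rw [xpAgo, xpqFrag]
  simp [isIn_singleton_false _ _ h]

-- ===== VERDICT (by name: the statement is the Claim_ definition above) =====
theorem xpathquoter_spec : Claim_equal_xpathquoter := by
  intro s _
  show xpathquoter s = xpathquoter_alt s
  rw [xpathquoter, xpathquoter_alt]
  by_cases hq : PySem.Chars.isIn ['"'] s.toList = true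
  · rw [if_neg (by simp [hq])]
    by_cases hs : PySem.Chars.isIn ['\''] s.toList = true
    · -- both quote kinds present
      rw [if_neg (by simp [hs])]
      have hne : s.toList ≠ [] := List.ne_nil_of_mem (isIn_singleton_mem _ _ hq)
      obtain ⟨k, hk⟩ : ∃ k, s.toList.length = k + 1 :=
        ⟨s.toList.length - 1, by have := List.length_pos_iff.mpr hne; omega⟩
      rw [hk, xpAgo]
      simp only [hq, hs, Bool.and_self, if_true]
      congr 1
      congr 2
      rw [splitOn_eq, xpqLoop_eq]
      have hid : (split1 '"' s.toList).modifyHead ([] ++ ·) = split1 '"' s.toList := by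
        cases split1 '"' s.toList <;> simp [List.modifyHead]
      rw [hid, List.nil_append]
      congr 1
      apply List.map_congr_left
      intro p hp
      exact xpAgo_frag k p (mem_split1_not_mem '"' s.toList p hp)
    · -- only double quote present
      rw [Bool.not_eq_true] at hs
      rw [if_pos hs, xpAgo]
      simp [hq, hs]
  · -- no double quote
    rw [Bool.not_eq_true] at hq
    rw [if_pos hq, xpAgo, xpqFrag]
    simp only [hq, Bool.false_and, if_false, Bool.false_eq_true]
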